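-- pv_equiv track=rewrite | github.com/matejMartinc/meta_learning_framework | train.py | make_fixed_conversation
-- ===== SOURCE A (Python) =====
-- def make_fixed_conversation(original_item, fixed_assistant_text):
--     import copy
--     item = copy.deepcopy(original_item)
--     turns = item["conversations"]
--     # Find the last assistant turn and replace its text
--     for turn in reversed(turns):
--         key = "value" if "value" in turn else "content"
--         role = turn.get("from", turn.get("role", ""))
--         if role in ("gpt", "assistant"):
--             turn[key] = fixed_assistant_text
--             break
--     return item
-- ===== SOURCE B (Python) =====
-- def make_fixed_conversation(original_item, fixed_assistant_text):
--     import copy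
--     item = copy.deepcopy(original_item)
--     turns = item["conversations"]
--     # Single forward pass: remember index of every assistant turn; the last one survives.
--     last_idx = None
--     for i, turn in enumerate(turns):
--         if turn.get("from", turn.get("role", "")) in ("gpt", "assistant"):
--             last_idx = i
--     if last_idx is not None:
--         turn = turns[last_idx]
--         key = "value" if "value" in turn else "content"
--         turn[key] = fixed_assistant_text
--     return item
-- ===== Notes on version B (the rewrite author's own statement) =====
-- stated objective: alternative
-- what changed: Instead of iterating over reversed(turns) and mutating-then-breaking inside the loop, B makes one forward enumerate pass that only records the index of the last assistant turn, and performs the replacement in a separate post-loop step.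
import Mathlib
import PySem

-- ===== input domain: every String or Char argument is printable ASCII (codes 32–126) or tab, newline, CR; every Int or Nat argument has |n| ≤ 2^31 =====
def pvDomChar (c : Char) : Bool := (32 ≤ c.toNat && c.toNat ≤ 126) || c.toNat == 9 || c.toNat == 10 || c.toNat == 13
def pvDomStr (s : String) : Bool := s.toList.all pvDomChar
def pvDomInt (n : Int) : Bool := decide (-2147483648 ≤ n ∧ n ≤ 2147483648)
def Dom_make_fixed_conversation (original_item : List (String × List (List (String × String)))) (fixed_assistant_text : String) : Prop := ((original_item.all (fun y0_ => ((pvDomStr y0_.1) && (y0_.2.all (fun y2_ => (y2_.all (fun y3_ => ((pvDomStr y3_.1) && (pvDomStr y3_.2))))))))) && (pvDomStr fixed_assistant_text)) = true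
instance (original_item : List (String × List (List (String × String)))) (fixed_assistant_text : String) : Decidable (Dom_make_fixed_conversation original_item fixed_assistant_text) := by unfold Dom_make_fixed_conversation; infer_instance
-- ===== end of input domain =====

-- B replaces A's reversed-iteration-with-break by one forward enumerate pass recording the
-- last assistant index, then a separate post-loop replacement (alternative decomposition, same cost).

-- Shared helpers (both Pythons contain these exact sub-expressions).
-- role = turn.get("from", turn.get("role", ""))  in ("gpt", "assistant")
def pvIsAsst (t : List (String × String)) : Bool :=
  let role := PySem.Dict.getD (PySem.Dict.mk t) "from" (PySem.Dict.getD (PySem.Dict.mk t) "role" "")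
  role == "gpt" || role == "assistant"

-- key = "value" if "value" in turn else "content"; turn[key] = fixed_assistant_text
def pvFixTurn (t : List (String × String)) (text : String) : List (String × String) :=
  let key := if PySem.Dict.contains (PySem.Dict.mk t) "value" then "value" else "content"
  (PySem.Dict.insert (PySem.Dict.mk t) key text).items

-- ===== PORT A =====
-- 'for turn in reversed(turns): … break' over the reversed list; mutation of the current
-- turn followed by break = replace the head and keep the rest.
def pvALoop (text : String) : List (List (String × String)) → List (List (String × String))
  | [] => []
  | t :: rest => if pvIsAsst t then pvFixTurn t text :: rest else t :: pvALoop text rest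

def make_fixed_conversation (original_item : List (String × List (List (String × String)))) (fixed_assistant_text : String) : List (String × List (List (String × String))) :=
  match PySem.Dict.get? (PySem.Dict.mk original_item) "conversations" with
  | none => original_item  -- Python raises KeyError here; excluded by Pre_
  | some turns =>
      -- the in-place mutation of `turns` is written back into the dict
      (PySem.Dict.insert (PySem.Dict.mk original_item) "conversations"
        ((pvALoop fixed_assistant_text turns.reverse).reverse)).items

-- ===== PORT B =====
-- forward pass: last_idx = index of the last assistant turn (None if absent)
def pvLastIdx (turns : List (List (String × String))) : Option Int :=
  (PySem.List.enumerate turns).foldl (fun acc p => if pvIsAsst p.2 then some p.1 else acc) none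

def make_fixed_conversation_alt (original_item : List (String × List (List (String × String)))) (fixed_assistant_text : String) : List (String × List (List (String × String))) :=
  match PySem.Dict.get? (PySem.Dict.mk original_item) "conversations" with
  | none => original_item  -- Python raises KeyError here; excluded by Pre_
  | some turns =>
      match pvLastIdx turns with
      | none => original_item
      | some j =>
          match PySem.List.pyGet? turns j with
          | none => original_item  -- unreachable: last_idx is a valid index
          | some t =>
              -- turns[last_idx][key] = fixed_assistant_text, written back into the dict
              (PySem.Dict.insert (PySem.Dict.mk original_item) "conversations"
                (turns.set j.toNat (pvFixTurn t fixed_assistant_text))).items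

-- ===== PRECONDITION & SPEC =====
-- Pre_ excludes (a) items without a "conversations" key, on which Python A raises KeyError, and
-- (b) association lists with duplicate keys (in the item or in a turn), which no Python dict
-- can represent, so A's behaviour there is not defined.
def Pre_make_fixed_conversation (original_item : List (String × List (List (String × String)))) (fixed_assistant_text : String) : Prop :=
  "conversations" ∈ original_item.map Prod.fst
  ∧ (original_item.map Prod.fst).Nodup
  ∧ ∀ p ∈ original_item, ∀ t ∈ p.2, (t.map Prod.fst).Nodup
instance (original_item : List (String × List (List (String × String)))) (fixed_assistant_text : String) : Decidable (Pre_make_fixed_conversation original_item fixed_assistant_text) := by unfold Pre_make_fixed_conversation; infer_instance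

def pvWitness_make_fixed_conversation : (List (String × List (List (String × String)))) × String :=
  ([("conversations", [[("from", "human"), ("value", "hi")], [("from", "gpt"), ("value", "yo")]])], "FIX")

def Spec_make_fixed_conversation (original_item : List (String × List (List (String × String)))) (fixed_assistant_text : String) (out : List (String × List (List (String × String)))) : Prop := out = make_fixed_conversation_alt original_item fixed_assistant_text
instance (original_item : List (String × List (List (String × String)))) (fixed_assistant_text : String) (out : List (String × List (List (String × String)))) : Decidable (Spec_make_fixed_conversation original_item fixed_assistant_text out) := by unfold Spec_make_fixed_conversation; infer_instance

-- ===== CLAIM (what is proved, stated in full; the proofs are below) =====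
def Claim_equal_make_fixed_conversation : Prop := ∀ (original_item : List (String × List (List (String × String)))) (fixed_assistant_text : String), Dom_make_fixed_conversation original_item fixed_assistant_text → Pre_make_fixed_conversation original_item fixed_assistant_text → Spec_make_fixed_conversation original_item fixed_assistant_text (make_fixed_conversation original_item fixed_assistant_text)

-- ===== LEMMAS AND PROOFS =====

-- pvLastIdx over a snoc
theorem pvLastIdx_snoc (l : List (List (String × String))) (t : List (String × String)) :
    pvLastIdx (l ++ [t]) = if pvIsAsst t then some (l.length : Int) else pvLastIdx l := by
  unfold pvLastIdx
  rw [PySem.List.enumerate_append, List.foldl_append]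
  simp [PySem.List.enumerate_cons, PySem.List.enumerate_nil]

-- any index pvLastIdx returns is a valid nonnegative index
theorem pvLastIdx_lt (l : List (List (String × String))) (j : Int) (h : pvLastIdx l = some j) :
    0 ≤ j ∧ j < l.length := by
  induction l using List.reverseRecOn generalizing j with
  | nil => simp [pvLastIdx, PySem.List.enumerate_nil] at h
  | append_singleton l t ih =>
      rw [pvLastIdx_snoc] at h
      split at h
      · cases h; simp
      · obtain ⟨h0, hlt⟩ := ih j h
        refine ⟨h0, ?_⟩
        simp only [List.length_append, List.length_cons, List.length_nil]
        push_cast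
        omega

-- core: A's reversed-scan result equals B's set-at-last-index result
theorem pvCore (text : String) (l : List (List (String × String))) :
    (pvALoop text l.reverse).reverse =
      match pvLastIdx l with
      | none => l
      | some j =>
          match PySem.List.pyGet? l j with
          | none => l
          | some t => l.set j.toNat (pvFixTurn t text) := by
  induction l using List.reverseRecOn with
  | nil => rfl
  | append_singleton l t ih =>
      rw [List.reverse_append, pvLastIdx_snoc]
      simp only [List.reverse_cons, List.reverse_nil, List.nil_append, List.singleton_append]
      by_cases ha : pvIsAsst t
      · rw [if_pos ha]
        simp only [pvALoop, if_pos ha, List.reverse_cons, List.reverse_reverse]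
        rw [PySem.List.pyGet?_append_length]
        simp
      · rw [if_neg ha]
        simp only [pvALoop, if_neg ha, List.reverse_cons]
        rw [ih]
        cases hl : pvLastIdx l with
        | none => rfl
        | some j =>
            obtain ⟨h0, hlt⟩ := pvLastIdx_lt l j hl
            have hjn : j.toNat < l.length := by omega
            dsimp only
            rw [PySem.List.pyGet?_of_nonneg l h0, PySem.List.pyGet?_of_nonneg (l ++ [t]) h0]
            rw [List.getElem?_append_left hjn]
            cases hgt : l[j.toNat]? with
            | none => rfl
            | some u =>
                simp only [List.set_append, if_pos hjn]

-- overwriting a nodup-keyed assoc list's key with its own first value is the identity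
theorem pvInsert_self (l : List (String × List (List (String × String)))) (v : List (List (String × String)))
    (hnd : (l.map Prod.fst).Nodup) (h : PySem.Dict.get? (PySem.Dict.mk l) "conversations" = some v) :
    (PySem.Dict.insert (PySem.Dict.mk l) "conversations" v).items = l := by
  induction l with
  | nil => simp [PySem.Dict.get?] at h
  | cons p rest ih =>
      obtain ⟨k, w⟩ := p
      rw [PySem.Dict.get?_mk_cons] at h
      simp only [List.map_cons, List.nodup_cons] at hnd
      by_cases hk : k = "conversations"
      · subst hk
        simp only [beq_self_eq_true, if_true, Option.some.injEq] at h
        subst h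
        have hcon : (PySem.Dict.mk (("conversations", w) :: rest)).contains "conversations" = true := by
          simp [PySem.Dict.contains_mk]
        rw [PySem.Dict.items_insert_of_contains _ _ hcon]
        simp only [List.map_cons, beq_self_eq_true, if_true]
        congr 1
        have hq : ∀ q ∈ rest,
            (fun p => if (p.1 == "conversations") = true then ("conversations", w) else p) q = id q := by
          intro q hqm
          have hne : q.1 ≠ "conversations" := by
            intro he
            exact hnd.1 (he ▸ List.mem_map_of_mem hqm)
          simp [hne]
        rw [List.map_congr_left hq, List.map_id]
      · have hbk : (k == "conversations") = false := by simp [hk]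
        rw [hbk] at h
        simp only [if_neg Bool.false_ne_true] at h
        have hresult := ih hnd.2 h
        have hconr : (PySem.Dict.mk rest).contains "conversations" = true := by
          rw [PySem.Dict.contains_eq_isSome_get?, h]; rfl
        have hcon : (PySem.Dict.mk ((k, w) :: rest)).contains "conversations" = true := by
          simp only [PySem.Dict.contains_mk] at hconr ⊢
          simp [hconr]
        rw [PySem.Dict.items_insert_of_contains _ _ hcon]
        rw [PySem.Dict.items_insert_of_contains _ _ hconr] at hresult
        simp only [List.map_cons, hbk, if_neg Bool.false_ne_true]
        rw [hresult]

-- ===== VERDICT (by name: the statement is the Claim_ definition above) =====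
theorem make_fixed_conversation_spec : Claim_equal_make_fixed_conversation := by
  intro item text _hdom hpre
  unfold Spec_make_fixed_conversation make_fixed_conversation make_fixed_conversation_alt
  cases hg : PySem.Dict.get? (PySem.Dict.mk item) "conversations" with
  | none => rfl
  | some turns =>
      simp only
      rw [pvCore]
      cases hl : pvLastIdx turns with
      | none => exact pvInsert_self item turns hpre.2.1 hg
      | some j =>
          obtain ⟨h0, hlt⟩ := pvLastIdx_lt turns j hl
          cases hget : PySem.List.pyGet? turns j with
          | none =>
              exfalso
              rw [PySem.List.pyGet?_of_nonneg turns h0, List.getElem?_eq_none_iff] at hget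
              omega
          | some t => simp only [hget]
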